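-- pv_equiv track=rewrite | github.com/vigneshsabapathi/python-algorithms | sorts/merge_insertion_sort_optimized.py | _jacobsthal_insertion_order
-- ===== SOURCE A (Python) =====
-- def _jacobsthal(n: int) -> int:
--     """Return the nth Jacobsthal number: J(0)=0, J(1)=1, J(n)=J(n-1)+2*J(n-2)."""
--     if n == 0:
--         return 0
--     if n == 1:
--         return 1
--     a, b = 0, 1
--     for _ in range(n - 1):
--         a, b = b, b + 2 * a
--     return b
--
-- def _jacobsthal_insertion_order(n: int) -> list[int]:
--     """
--     Return the 0-indexed Jacobsthal insertion order for n pending elements.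
--
--     pending[i] corresponds to b_{i+2} in the 1-indexed Ford-Johnson scheme
--     (b_1 is already placed; pending starts at b_2).
--
--     Standard 1-indexed insertion order: b_3, b_2, b_5, b_4, b_11,...,b_6, ...
--     Converted to 0-indexed pending: b_{i+2} → index i.
--
--     >>> _jacobsthal_insertion_order(0)
--     []
--     >>> _jacobsthal_insertion_order(1)
--     [0]
--     >>> _jacobsthal_insertion_order(5)
--     [1, 0, 3, 2, 4]
--     >>> _jacobsthal_insertion_order(8)
--     [1, 0, 3, 2, 7, 6, 5, 4]
--     """
--     if n == 0:
--         return []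
--     order = []
--     k = 3
--     while True:
--         jk   = _jacobsthal(k)      # upper end of group (1-indexed b position)
--         jkm1 = _jacobsthal(k - 1)  # lower end + 1 (exclusive lower bound)
--         # 1-indexed b positions: jk, jk-1, ..., jkm1+1
--         # 0-indexed pending:      jk-2, jk-3, ..., jkm1-1
--         hi_0 = min(jk, n + 1) - 2      # inclusive upper, capped at n-1
--         lo_0 = jkm1 - 1                 # inclusive lower
--         if lo_0 >= n:
--             break
--         for idx in range(hi_0, lo_0 - 1, -1):
--             if 0 <= idx < n:
--                 order.append(idx)
--         if jk >= n + 1: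
--             break
--         k += 1
--     return order
-- ===== SOURCE B (Python) =====
-- def _jacobsthal_insertion_order(n: int) -> list[int]:
--     order = list(range(n))
--     a, b = 1, 1
--     start = 0
--     while start < n:
--         a, b = b, b + 2 * a
--         end = min(b - 1, n)
--         order[start:end] = order[start:end][::-1]
--         start = end
--     return order
-- ===== Notes on version B (the rewrite author's own statement) =====
-- stated objective: simpler
-- what changed: B builds the identity list range(n) and reverses Jacobsthal-bounded slices of it in place with a rolling Jacobsthal pair, instead of A's while-True loop that recomputes two Jacobsthal numbers from scratch each round and appends a filtered descending range per block.
import Mathlib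
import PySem

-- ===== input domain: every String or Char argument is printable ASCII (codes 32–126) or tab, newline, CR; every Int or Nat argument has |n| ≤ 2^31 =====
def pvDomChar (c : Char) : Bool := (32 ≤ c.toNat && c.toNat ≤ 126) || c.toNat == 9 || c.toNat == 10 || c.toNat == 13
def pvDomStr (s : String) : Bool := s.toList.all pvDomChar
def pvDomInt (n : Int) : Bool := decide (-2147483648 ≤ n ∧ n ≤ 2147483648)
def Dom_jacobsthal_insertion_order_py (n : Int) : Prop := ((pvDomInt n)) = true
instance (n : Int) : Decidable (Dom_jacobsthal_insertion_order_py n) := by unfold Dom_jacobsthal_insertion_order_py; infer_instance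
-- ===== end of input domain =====

-- B replaces A's append-descending-Jacobsthal-blocks loop (with a per-block filter and a
-- per-iteration Jacobsthal recomputation) by in-place reversal of Jacobsthal-bounded slices
-- of the identity permutation, with a rolling Jacobsthal pair; objective: simpler.

-- ===== PORT A =====
-- port of _jacobsthal
def jacobsthalA (m : Int) : Int :=
  if m = 0 then 0
  else if m = 1 then 1
  else ((PySem.List.pyRange 0 (m - 1) 1).foldl
      (fun (ab : Int × Int) _ => (ab.2, ab.2 + 2 * ab.1)) (0, 1)).2

-- A's 'while True' loop; fuel only makes the recursion total (always sufficient on Dom,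
-- proved in the equivalence proof)
def aLoop (n : Int) : Nat → Int → List Int → List Int
  | 0, _, order => order
  | fuel + 1, k, order =>
    let jk := jacobsthalA k
    let jkm1 := jacobsthalA (k - 1)
    let hi0 := min jk (n + 1) - 2
    let lo0 := jkm1 - 1
    if lo0 ≥ n then order
    else
      let order' := (PySem.List.pyRange hi0 (lo0 - 1) (-1)).foldl
        (fun acc idx => if 0 ≤ idx ∧ idx < n then acc ++ [idx] else acc) order
      if jk ≥ n + 1 then order' else aLoop n fuel (k + 1) order'

def jacobsthal_insertion_order_py (n : Int) : List Int :=
  if n = 0 then [] else aLoop n (n.toNat + 4) 3 []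

-- ===== PORT B =====
-- B's 'while start < n' loop; fuel only makes the recursion total (always sufficient,
-- since start strictly increases towards n)
def bLoop (n : Int) : Nat → Int × Int → Int → List Int → List Int
  | 0, _, _, order => order
  | fuel + 1, ab, start, order =>
    if start < n then
      let a' := ab.2
      let b' := ab.2 + 2 * ab.1
      let e := min (b' - 1) n
      let order' := PySem.List.slice order (some 0) (some start)
        ++ (PySem.List.slice order (some start) (some e)).reverse
        ++ PySem.List.slice order (some e) none
      bLoop n fuel (a', b') e order'
    else order

def jacobsthal_insertion_order_py_alt (n : Int) : List Int :=
  bLoop n (n.toNat + 1) (1, 1) 0 (PySem.List.pyRange 0 n 1)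

-- ===== PRECONDITION & SPEC =====
def Spec_jacobsthal_insertion_order_py (n : Int) (out : List Int) : Prop := out = jacobsthal_insertion_order_py_alt n
instance (n : Int) (out : List Int) : Decidable (Spec_jacobsthal_insertion_order_py n out) := by unfold Spec_jacobsthal_insertion_order_py; infer_instance

-- ===== CLAIM (what is proved, stated in full; the proofs are below) =====
def Claim_equal_jacobsthal_insertion_order_py : Prop := ∀ (n : Int), Dom_jacobsthal_insertion_order_py n → Spec_jacobsthal_insertion_order_py n (jacobsthal_insertion_order_py n)

-- ===== LEMMAS AND PROOFS =====

-- reference Jacobsthal numbers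
def Jref : Nat → Int
  | 0 => 0
  | 1 => 1
  | k + 2 => Jref (k + 1) + 2 * Jref k

lemma Jref_nonneg_pair : ∀ m, 0 ≤ Jref m ∧ 0 ≤ Jref (m + 1) := by
  intro m
  induction m with
  | zero => simp [Jref]
  | succ m ih =>
    refine ⟨ih.2, ?_⟩
    show 0 ≤ Jref (m + 2)
    have := ih.1; have := ih.2
    simp only [Jref]; omega

lemma Jref_pos (m : Nat) : 1 ≤ Jref (m + 1) := by
  induction m with
  | zero => simp [Jref]
  | succ m ih =>
    have h := (Jref_nonneg_pair m).1
    show 1 ≤ Jref (m + 2)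
    simp only [Jref]; omega

def jstep (p : Int × Int) : Int × Int := (p.2, p.2 + 2 * p.1)

lemma foldl_jstep (l : List Int) (p : Int × Int) :
    l.foldl (fun (ab : Int × Int) _ => (ab.2, ab.2 + 2 * ab.1)) p = jstep^[l.length] p := by
  induction l generalizing p with
  | nil => rfl
  | cons x xs ih =>
    simp only [List.foldl_cons, List.length_cons, Function.iterate_succ_apply]
    exact ih _

lemma iterate_jstep (j i : Nat) :
    jstep^[j] (Jref i, Jref (i + 1)) = (Jref (i + j), Jref (i + j + 1)) := by
  induction j generalizing i with
  | zero => rfl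
  | succ j ih =>
    rw [Function.iterate_succ_apply]
    have : jstep (Jref i, Jref (i + 1)) = (Jref (i + 1), Jref (i + 2)) := by
      simp [jstep, Jref]
    rw [this, ih]
    congr 1 <;> congr 1 <;> omega

lemma jacA_eq (m : Nat) : jacobsthalA (m : Int) = Jref m := by
  match m with
  | 0 => simp [jacobsthalA, Jref]
  | 1 => simp [jacobsthalA, Jref]
  | m + 2 =>
    have h0 : ((m + 2 : Nat) : Int) ≠ 0 := by omega
    have h1 : ((m + 2 : Nat) : Int) ≠ 1 := by omega
    have hr : ((m + 2 : Nat) : Int) - 1 = ((m + 1 : Nat) : Int) := by push_cast; ring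
    rw [jacobsthalA, if_neg h0, if_neg h1, hr, foldl_jstep]
    have hlen : (PySem.List.pyRange 0 ((m + 1 : Nat) : Int) 1).length = m + 1 := by
      rw [PySem.List.length_pyRange_one]; omega
    rw [hlen]
    have : jstep^[m + 1] (Jref 0, Jref 1) = (Jref (m + 1), Jref (m + 2)) := by
      have := iterate_jstep (m + 1) 0
      simpa using this
    simpa [Jref] using congrArg Prod.snd this

lemma aLoop_acc (n : Int) : ∀ (fuel : Nat) (k : Int) (order : List Int),
    aLoop n fuel k order = order ++ aLoop n fuel k [] := by
  intro fuel
  induction fuel with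
  | zero => intro k order; simp [aLoop]
  | succ fuel ih =>
    intro k order
    simp only [aLoop]
    split
    · simp
    · rw [PySem.List.foldl_append_ite_eq_filter, PySem.List.foldl_append_ite_eq_filter]
      split
      · simp
      · rw [ih _ (order ++ _), ih _ (List.nil ++ _)]
        simp

lemma bLoop_exit (n : Int) (fuel : Nat) (ab : Int × Int) (start : Int) (order : List Int)
    (h : ¬ start < n) : bLoop n fuel ab start order = order := by
  cases fuel <;> simp [bLoop, h]

lemma main_lemma (n : Int) : ∀ (fa fb : Nat) (k : Nat) (P : List Int),
    3 ≤ k →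
    Jref (k - 1) - 1 < n →
    n + 2 - Jref (k - 1) ≤ (fa : Int) →
    n - (Jref (k - 1) - 1) ≤ (fb : Int) →
    P.length = (Jref (k - 1) - 1).toNat →
    bLoop n fb (Jref (k - 2), Jref (k - 1)) (Jref (k - 1) - 1)
        (P ++ PySem.List.pyRange (Jref (k - 1) - 1) n 1)
      = P ++ aLoop n fa (k : Int) [] := by
  intro fa
  induction fa with
  | zero =>
    intro fb k P hk hlt hfa hfb hP
    exfalso; omega
  | succ fa ih =>
    intro fb k P hk hlt hfa hfb hP
    obtain ⟨m, rfl⟩ : ∃ m, k = m + 3 := ⟨k - 3, by omega⟩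
    simp only [show m + 3 - 1 = m + 2 from rfl, show m + 3 - 2 = m + 1 from rfl] at *
    set s : Int := Jref (m + 2) - 1 with hs
    have hJ2pos : 1 ≤ Jref (m + 2) := Jref_pos (m + 1)
    have hJ1pos : 1 ≤ Jref (m + 1) := Jref_pos m
    have hJstep : Jref (m + 3) = Jref (m + 2) + 2 * Jref (m + 1) := by simp [Jref]
    have hs0 : 0 ≤ s := by omega
    -- fb must be positive
    obtain ⟨fb', rfl⟩ : ∃ fb', fb = fb' + 1 := by
      cases fb with
      | zero => exfalso; simp at hfb; omega
      | succ fb' => exact ⟨fb', rfl⟩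
    -- one step of bLoop
    rw [bLoop, if_pos (by omega : s < n)]
    rw [show Jref (m + 2) + 2 * Jref (m + 1) = Jref (m + 3) from hJstep.symm]
    set e : Int := min (Jref (m + 3) - 1) n with hedef
    dsimp only
    rw [← hedef]
    have hse : s + 1 ≤ e := by omega
    have he0 : 0 ≤ e := by omega
    have hen : e ≤ n := by omega
    -- decompose the order list
    have hsplit : PySem.List.pyRange s n 1
        = PySem.List.pyRange s e 1 ++ PySem.List.pyRange e n 1 :=
      PySem.List.pyRange_one_append s e n (by omega) (by omega)
    have hlen1 : (PySem.List.pyRange s e 1).length = (e - s).toNat :=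
      PySem.List.length_pyRange_one s e
    -- the three slices
    have hsl1 : PySem.List.slice (P ++ PySem.List.pyRange s n 1) (some 0) (some s) = P := by
      rw [PySem.List.slice_zero_start, PySem.List.slice_to _ hs0, ← hP]
      exact List.take_left
    have hsl2 : PySem.List.slice (P ++ PySem.List.pyRange s n 1) (some s) (some e)
        = PySem.List.pyRange s e 1 := by
      rw [PySem.List.slice_toNat _ hs0 he0]
      have hd : List.drop s.toNat (P ++ PySem.List.pyRange s n 1)
          = PySem.List.pyRange s n 1 := by rw [← hP]; exact List.drop_left
      rw [hd, hsplit]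
      have : (e.toNat - s.toNat) = (e - s).toNat := by omega
      rw [this, ← hlen1, List.take_left]
    have hsl3 : PySem.List.slice (P ++ PySem.List.pyRange s n 1) (some e) none
        = PySem.List.pyRange e n 1 := by
      rw [PySem.List.slice_from _ he0, hsplit, ← List.append_assoc]
      have hlen2 : (P ++ PySem.List.pyRange s e 1).length = e.toNat := by
        simp [hP, hlen1]; omega
      rw [← hlen2, List.drop_left]
    rw [hsl1, hsl2, hsl3]
    -- one step of aLoop
    rw [aLoop]
    have hk1 : ((m + 3 : Nat) : Int) - 1 = ((m + 2 : Nat) : Int) := by push_cast; ring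
    rw [hk1, jacA_eq (m + 3), jacA_eq (m + 2)]
    simp only
    rw [if_neg (by omega : ¬ Jref (m + 2) - 1 ≥ n)]
    rw [PySem.List.foldl_append_ite_eq_filter]
    -- the descending block equals the reversed slice
    have hhi : min (Jref (m + 3)) (n + 1) - 2 = e - 1 := by
      rw [hedef]; omega
    have hlo : Jref (m + 2) - 1 - 1 = s - 1 := by rw [hs]
    have hdesc : PySem.List.pyRange (min (Jref (m + 3)) (n + 1) - 2) (Jref (m + 2) - 1 - 1) (-1)
        = (PySem.List.pyRange s e 1).reverse := by
      rw [hhi, hlo, PySem.List.pyRange_neg_one_eq_reverse]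
      congr 2 <;> omega
    rw [hdesc]
    -- the filter keeps everything
    have hfilt : (((PySem.List.pyRange s e 1).reverse).filter
        (fun idx => decide (0 ≤ idx ∧ idx < n))) = (PySem.List.pyRange s e 1).reverse := by
      apply List.filter_eq_self.mpr
      intro x hx
      rw [List.mem_reverse, PySem.List.mem_pyRange_one] at hx
      simp only [decide_eq_true_eq]
      omega
    rw [hfilt, List.nil_append]
    by_cases hbig : Jref (m + 3) ≥ n + 1
    · -- last block: A breaks; B's next start is n and its loop exits
      rw [if_pos hbig]
      have hen' : e = n := by rw [hedef]; omega
      rw [bLoop_exit n fb' _ e _ (by omega)]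
      rw [hen', PySem.List.pyRange_one_eq_nil (le_refl n)]
      simp
    · -- continue: apply the induction hypothesis at k+1
      rw [if_neg hbig]
      have hen2 : e = Jref (m + 3) - 1 := by rw [hedef]; omega
      have hJ3step : Jref (m + 4) = Jref (m + 3) + 2 * Jref (m + 2) := by simp [Jref]
      have ihx := ih fb' (m + 4) (P ++ (PySem.List.pyRange s e 1).reverse)
        (by omega)
        (by simp only [show m + 4 - 1 = m + 3 from rfl]; omega)
        (by simp only [show m + 4 - 1 = m + 3 from rfl]; omega)
        (by simp only [show m + 4 - 1 = m + 3 from rfl]; omega)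
        (by simp only [show m + 4 - 1 = m + 3 from rfl]
            simp [hP, hlen1]; omega)
      simp only [show m + 4 - 1 = m + 3 from rfl, show m + 4 - 2 = m + 2 from rfl] at ihx
      rw [← hen2] at ihx
      have hcast : ((m + 4 : Nat) : Int) = ((m + 3 : Nat) : Int) + 1 := by push_cast; ring
      rw [hcast] at ihx
      rw [aLoop_acc n fa (((m + 3 : Nat) : Int) + 1) ((PySem.List.pyRange s e 1).reverse),
        ← List.append_assoc]
      exact ihx

-- ===== VERDICT (by name: the statement is the Claim_ definition above) =====
theorem jacobsthal_insertion_order_py_spec : Claim_equal_jacobsthal_insertion_order_py := by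
  intro n _
  unfold Spec_jacobsthal_insertion_order_py
  unfold jacobsthal_insertion_order_py jacobsthal_insertion_order_py_alt
  by_cases hn : n = 0
  · subst hn
    rw [if_pos rfl, bLoop_exit _ _ _ _ _ (by omega)]
    simp [PySem.List.pyRange_one_eq_nil]
  · rw [if_neg hn]
    by_cases hneg : n < 0
    · -- negative n: A's first block check breaks at once, B's loop never runs
      have ht : n.toNat = 0 := Int.toNat_of_nonpos (by omega)
      rw [ht]
      rw [bLoop_exit _ _ _ _ _ (by omega), PySem.List.pyRange_one_eq_nil (by omega)]
      show aLoop n 4 3 [] = []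
      rw [aLoop]
      have : jacobsthalA (3 - 1) = 1 := by
        have := jacA_eq 2
        norm_num at this ⊢
        rw [this]; simp [Jref]
      simp only [this]
      rw [if_pos (by omega : (1 : Int) - 1 ≥ n)]
    · -- n ≥ 1: the main loop correspondence with k = 3
      have hn1 : 1 ≤ n := by omega
      have h := main_lemma n (n.toNat + 4) (n.toNat + 1) 3 []
        (by omega)
        (by simp [Jref]; omega)
        (by simp [Jref]; omega)
        (by simp [Jref]; omega)
        (by simp [Jref])
      simp only [show (3 : Nat) - 1 = 2 from rfl, show (3 : Nat) - 2 = 1 from rfl] at h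
      have hJ1 : Jref 1 = 1 := rfl
      have hJ2 : Jref 2 = 1 := by simp [Jref]
      rw [hJ1, hJ2] at h
      norm_num at h
      exact h.symm
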